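-- pv_equiv track=rewrite | github.com/laoda414/vps-question-answer-search | scripts/translate_qa_resume.py | analyze_translation_status
-- ===== SOURCE A (Python) =====
-- from typing import List, Dict, Any, Optional
--
-- def needs_translation(qa_pair: Dict[str, Any]) -> bool:
--     """Check if a QA pair needs translation"""
--     # Check if English translations are missing or same as Portuguese (failed translation)
--     q_pt = qa_pair.get('question_pt', '')
--     q_en = qa_pair.get('question_en', '')
--     a_pt = qa_pair.get('answer_pt', '')
--     a_en = qa_pair.get('answer_en', '')
--
--     # Missing translation
--     if not q_en or not a_en:
--         return True
--
--     # Failed translation (English same as Portuguese)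
--     if q_en == q_pt or a_en == a_pt:
--         return True
--
--     # Very short translation (likely failed)
--     if len(q_en) < 3 or len(a_en) < 3:
--         return True
--
--     return False
--
-- def analyze_translation_status(qa_pairs: List[Dict[str, Any]]) -> Dict[str, int]:
--     """Analyze which QA pairs need translation"""
--     status = {
--         'total': len(qa_pairs),
--         'needs_translation': 0,
--         'already_translated': 0,
--         'missing_question': 0,
--         'missing_answer': 0,
--         'failed_translation': 0
--     }
--
--     for qa in qa_pairs:
--         if needs_translation(qa):
--             status['needs_translation'] += 1
--
--             # Categorize the issue
--             if not qa.get('question_en'):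
--                 status['missing_question'] += 1
--             if not qa.get('answer_en'):
--                 status['missing_answer'] += 1
--             if qa.get('question_en') == qa.get('question_pt') or qa.get('answer_en') == qa.get('answer_pt'):
--                 status['failed_translation'] += 1
--         else:
--             status['already_translated'] += 1
--
--     return status
-- ===== SOURCE B (Python) =====
-- from typing import List, Dict, Any
--
-- def needs_translation(qa_pair: Dict[str, Any]) -> bool:
--     q_pt = qa_pair.get('question_pt', '')
--     q_en = qa_pair.get('question_en', '')
--     a_pt = qa_pair.get('answer_pt', '')
--     a_en = qa_pair.get('answer_en', '')
--     if not q_en or not a_en: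
--         return True
--     if q_en == q_pt or a_en == a_pt:
--         return True
--     if len(q_en) < 3 or len(a_en) < 3:
--         return True
--     return False
--
-- def analyze_translation_status(qa_pairs: List[Dict[str, Any]]) -> Dict[str, int]:
--     total = len(qa_pairs)
--     needs = sum(1 for qa in qa_pairs if needs_translation(qa))
--     return {
--         'total': total,
--         'needs_translation': needs,
--         'already_translated': total - needs,
--         'missing_question': sum(1 for qa in qa_pairs if not qa.get('question_en')),
--         'missing_answer': sum(1 for qa in qa_pairs if not qa.get('answer_en')),
--         'failed_translation': sum(1 for qa in qa_pairs
--                                   if qa.get('question_en') == qa.get('question_pt')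
--                                   or qa.get('answer_en') == qa.get('answer_pt')),
--     }
-- ===== Notes on version B (the rewrite author's own statement) =====
-- stated objective: simpler
-- what changed: Replaces A's single fused loop with six counters and nested per-category guards by independent whole-list aggregates: each field is its own count over qa_pairs, already_translated is derived as total - needs, and the per-category conditions are counted unguarded because each one implies needs_translation.
import Mathlib
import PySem

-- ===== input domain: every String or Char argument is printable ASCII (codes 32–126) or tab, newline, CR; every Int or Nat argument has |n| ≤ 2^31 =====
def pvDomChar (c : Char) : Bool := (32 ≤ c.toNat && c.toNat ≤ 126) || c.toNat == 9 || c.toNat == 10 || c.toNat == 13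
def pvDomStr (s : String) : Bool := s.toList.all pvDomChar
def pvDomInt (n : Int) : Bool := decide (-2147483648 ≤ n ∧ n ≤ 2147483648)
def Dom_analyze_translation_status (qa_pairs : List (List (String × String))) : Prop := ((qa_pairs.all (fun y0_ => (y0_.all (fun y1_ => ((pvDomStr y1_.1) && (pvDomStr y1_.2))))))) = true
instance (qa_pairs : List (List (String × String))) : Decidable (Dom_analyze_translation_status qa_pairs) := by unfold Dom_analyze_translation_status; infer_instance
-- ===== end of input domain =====

-- B computes each output field as an independent aggregate over qa_pairs (already_translated derived
-- as total - needs) instead of A's single fused loop with six counters and nested guards; objective: simpler.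

-- ===== PORT A =====
-- shared helper of A and B (both Pythons define the identical needs_translation)
def needsTranslation (qa : PySem.Dict String String) : Bool :=
  let q_pt := qa.getD "question_pt" ""
  let q_en := qa.getD "question_en" ""
  let a_pt := qa.getD "answer_pt" ""
  let a_en := qa.getD "answer_en" ""
  if q_en == "" || a_en == "" then true
  else if q_en == q_pt || a_en == a_pt then true
  else if PySem.Str.len q_en < 3 || PySem.Str.len a_en < 3 then true
  else false

-- Python falsiness of dict.get(...) (None or "")
def optFalsy (o : Option String) : Bool :=
  match o with
  | none => true
  | some s => s == ""

-- one iteration of A's loop over the five mutable counters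
-- (needs_translation, already_translated, missing_question, missing_answer, failed_translation)
def stepA (st : Int × Int × Int × Int × Int) (qa0 : List (String × String)) :
    Int × Int × Int × Int × Int :=
  let qa := PySem.Dict.ofList qa0
  if needsTranslation qa then
    (st.1 + 1, st.2.1,
     (if optFalsy (qa.get? "question_en") then st.2.2.1 + 1 else st.2.2.1),
     (if optFalsy (qa.get? "answer_en") then st.2.2.2.1 + 1 else st.2.2.2.1),
     (if (qa.get? "question_en" == qa.get? "question_pt"
            || qa.get? "answer_en" == qa.get? "answer_pt")
        then st.2.2.2.2 + 1 else st.2.2.2.2))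
  else (st.1, st.2.1 + 1, st.2.2.1, st.2.2.2.1, st.2.2.2.2)

def analyze_translation_status (qa_pairs : List (List (String × String))) : List (String × Int) :=
  let s := qa_pairs.foldl stepA (0, 0, 0, 0, 0)
  [("total", (qa_pairs.length : Int)),
   ("needs_translation", s.1),
   ("already_translated", s.2.1),
   ("missing_question", s.2.2.1),
   ("missing_answer", s.2.2.2.1),
   ("failed_translation", s.2.2.2.2)]

-- ===== PORT B =====
def analyze_translation_status_alt (qa_pairs : List (List (String × String))) : List (String × Int) :=
  let total : Int := qa_pairs.length
  let needs : Int := qa_pairs.countP (fun qa => needsTranslation (PySem.Dict.ofList qa))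
  [("total", total),
   ("needs_translation", needs),
   ("already_translated", total - needs),
   ("missing_question",
     (qa_pairs.countP (fun qa => optFalsy ((PySem.Dict.ofList qa).get? "question_en")) : Int)),
   ("missing_answer",
     (qa_pairs.countP (fun qa => optFalsy ((PySem.Dict.ofList qa).get? "answer_en")) : Int)),
   ("failed_translation",
     (qa_pairs.countP (fun qa =>
        (PySem.Dict.ofList qa).get? "question_en" == (PySem.Dict.ofList qa).get? "question_pt"
          || (PySem.Dict.ofList qa).get? "answer_en" == (PySem.Dict.ofList qa).get? "answer_pt") : Int))]

-- ===== PRECONDITION & SPEC =====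
def Spec_analyze_translation_status (qa_pairs : List (List (String × String))) (out : List (String × Int)) : Prop := out = analyze_translation_status_alt qa_pairs
instance (qa_pairs : List (List (String × String))) (out : List (String × Int)) : Decidable (Spec_analyze_translation_status qa_pairs out) := by unfold Spec_analyze_translation_status; infer_instance

-- ===== CLAIM (what is proved, stated in full; the proofs are below) =====
def Claim_equal_analyze_translation_status : Prop := ∀ (qa_pairs : List (List (String × String))), Dom_analyze_translation_status qa_pairs → Spec_analyze_translation_status qa_pairs (analyze_translation_status qa_pairs)

-- ===== LEMMAS AND PROOFS =====

-- the five per-element predicates A's loop counts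
def pN (qa : List (String × String)) : Bool := needsTranslation (PySem.Dict.ofList qa)
def pQ (qa : List (String × String)) : Bool := optFalsy ((PySem.Dict.ofList qa).get? "question_en")
def pM (qa : List (String × String)) : Bool := optFalsy ((PySem.Dict.ofList qa).get? "answer_en")
def pF (qa : List (String × String)) : Bool :=
  (PySem.Dict.ofList qa).get? "question_en" == (PySem.Dict.ofList qa).get? "question_pt"
    || (PySem.Dict.ofList qa).get? "answer_en" == (PySem.Dict.ofList qa).get? "answer_pt"

theorem foldA (l : List (List (String × String))) (n a q m f : Int) :
    l.foldl stepA (n, a, q, m, f) =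
      (n + l.countP pN, a + l.countP (fun x => !pN x),
       q + l.countP (fun x => pN x && pQ x),
       m + l.countP (fun x => pN x && pM x),
       f + l.countP (fun x => pN x && pF x)) := by
  induction l generalizing n a q m f with
  | nil => simp
  | cons x l ih =>
    simp only [List.foldl, List.countP_cons]
    by_cases hn : pN x
    · by_cases hq : pQ x <;> by_cases hm : pM x <;> by_cases hf : pF x <;>
        · simp only [stepA, pN, pQ, pM, pF] at hn hq hm hf ⊢
          simp only [hn, hq, hm, hf, if_true, ih, Bool.not_true, Bool.and_self]
          refine Prod.ext ?_ (Prod.ext ?_ (Prod.ext ?_ (Prod.ext ?_ ?_))) <;> simp [pN, pQ, pM, pF] <;> omega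
    · have hn' : pN x = false := by simpa using hn
      simp only [stepA, pN] at hn' ⊢
      simp only [hn', Bool.false_and, ih, Bool.not_false]
      refine Prod.ext ?_ (Prod.ext ?_ (Prod.ext ?_ (Prod.ext ?_ ?_))) <;> simp [pN, pQ, pM, pF] <;> omega

theorem getD_falsy (d : PySem.Dict String String) (k : String)
    (h : optFalsy (d.get? k) = true) : d.getD k "" = "" := by
  rw [PySem.Dict.getD_eq_get?_getD]
  cases hg : d.get? k with
  | none => rfl
  | some s => rw [hg] at h; simpa [optFalsy] using h

theorem pQ_imp (x : List (String × String)) (h : pQ x = true) : pN x = true := by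
  have := getD_falsy (PySem.Dict.ofList x) "question_en" h
  simp [pN, needsTranslation, this]

theorem pM_imp (x : List (String × String)) (h : pM x = true) : pN x = true := by
  have := getD_falsy (PySem.Dict.ofList x) "answer_en" h
  simp [pN, needsTranslation, this]

theorem pF_imp (x : List (String × String)) (h : pF x = true) : pN x = true := by
  simp only [pF, Bool.or_eq_true, beq_iff_eq] at h
  rcases h with h | h
  · have hgd : (PySem.Dict.ofList x).getD "question_en" "" = (PySem.Dict.ofList x).getD "question_pt" "" := by
      rw [PySem.Dict.getD_eq_get?_getD, PySem.Dict.getD_eq_get?_getD, h]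
    simp only [pN, needsTranslation, hgd]
    split_ifs <;> simp_all
  · have hgd : (PySem.Dict.ofList x).getD "answer_en" "" = (PySem.Dict.ofList x).getD "answer_pt" "" := by
      rw [PySem.Dict.getD_eq_get?_getD, PySem.Dict.getD_eq_get?_getD, h]
    simp only [pN, needsTranslation, hgd]
    split_ifs <;> simp_all

theorem guard_drop (p : List (String × String) → Bool)
    (himp : ∀ x, p x = true → pN x = true) :
    (fun x => pN x && p x) = p := by
  funext x
  cases hp : p x
  · simp
  · simp [himp x hp]

theorem count_not_pN (l : List (List (String × String))) :
    (l.countP (fun x => !pN x) : Int) = (l.length : Int) - (l.countP pN : Int) := by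
  induction l with
  | nil => simp
  | cons x l ih =>
    simp only [List.countP_cons, List.length_cons]
    cases hx : pN x <;> (push_cast; rw [ih]) <;> simp <;> ring

-- ===== VERDICT (by name: the statement is the Claim_ definition above) =====
theorem analyze_translation_status_spec : Claim_equal_analyze_translation_status := by
  unfold Claim_equal_analyze_translation_status
  intro qa_pairs _
  unfold Spec_analyze_translation_status analyze_translation_status analyze_translation_status_alt
  rw [foldA]
  rw [guard_drop pQ pQ_imp, guard_drop pM pM_imp, guard_drop pF pF_imp]
  simp only [zero_add]
  rw [count_not_pN]
  rfl
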